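-- pv_equiv track=rewrite | github.com/usdaerin/OctavianCipher | new.py | caesar_encrypt_variable
-- ===== SOURCE A (Python) =====
-- def caesar_encrypt_variable(text, shift_list):
--     # Step 1: Original keystring encryption
--     n = len(shift_list)
--     temp = ""
--     for i, char in enumerate(text):
--         if 32 <= ord(char) <= 126:
--             shifted = chr((ord(char) - 32 + shift_list[i % n]) % 95 + 32)
--             temp += shifted
--         else:
--             temp += char
--
--     # Step 2: Layered shifts
--     result = temp
--     for shift in shift_list:
--         result = ''.join(
--             chr((ord(c) - 32 + shift) % 95 + 32) if 32 <= ord(c) <= 126 else c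
--             for c in result
--         )
--     total_shift = sum(shift_list)
--     result = ''.join(
--         chr((ord(c) - 32 + total_shift) % 95 + 32) if 32 <= ord(c) <= 126 else c
--         for c in result
--     )
--     return result
-- ===== SOURCE B (Python) =====
-- def caesar_encrypt_variable(text, shift_list):
--     # One pass: each layered shift plus the final total shift collapses into
--     # a single per-position shift of shift_list[i % n] + 2*sum(shift_list).
--     n = len(shift_list)
--     total2 = 2 * sum(shift_list)
--     combined = [(s + total2) % 95 for s in shift_list]
--     out = []
--     for i, c in enumerate(text):
--         o = ord(c)
--         if 32 <= o <= 126: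
--             out.append(chr((o - 32 + combined[i % n]) % 95 + 32))
--         else:
--             out.append(c)
--     return ''.join(out)
-- ===== Notes on version B (the rewrite author's own statement) =====
-- stated objective: faster
-- what changed: B replaces A's n+1 whole-string re-encryption passes after the keyed pass by a single pass over the text using a precomputed per-position shift table (shift_list[i%n] + 2*sum(shift_list)) % 95, since successive Caesar shifts compose additively mod 95.
import Mathlib
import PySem

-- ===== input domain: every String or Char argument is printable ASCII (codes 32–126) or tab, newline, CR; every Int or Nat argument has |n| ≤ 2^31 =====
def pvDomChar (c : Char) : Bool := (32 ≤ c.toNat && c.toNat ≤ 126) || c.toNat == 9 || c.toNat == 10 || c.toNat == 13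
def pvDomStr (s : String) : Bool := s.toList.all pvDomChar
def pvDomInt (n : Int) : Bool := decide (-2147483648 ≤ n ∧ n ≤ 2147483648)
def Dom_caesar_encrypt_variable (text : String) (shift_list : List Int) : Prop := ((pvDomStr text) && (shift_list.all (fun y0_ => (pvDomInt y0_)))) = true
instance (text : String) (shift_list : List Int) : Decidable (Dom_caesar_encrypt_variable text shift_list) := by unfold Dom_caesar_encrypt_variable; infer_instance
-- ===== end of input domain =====

-- B collapses A's n+1 whole-string re-encryption passes into one pass with a
-- precomputed per-position shift table shift_list[i%n] + 2*sum(shift_list) (mod 95).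

-- ===== PORT A =====
-- chr((ord(c) - 32 + s) % 95 + 32): the unconditional shift of a printable char
def pvShift (s : Int) (c : Char) : Char :=
  Char.ofNat ((PySem.Int.mod ((c.toNat : Int) - 32 + s) 95 + 32).toNat)

def caesar_encrypt_variable (text : String) (shift_list : List Int) : String :=
  let n : Int := shift_list.length
  -- Step 1: for i, char in enumerate(text): temp += …
  let temp : List Char := (PySem.List.enumerate text.toList 0).foldl
    (fun acc p =>
      if 32 ≤ p.2.toNat ∧ p.2.toNat ≤ 126 then
        acc ++ [pvShift (PySem.List.pyGetD shift_list (PySem.Int.mod p.1 n) 0) p.2]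
      else acc ++ [p.2]) []
  -- Step 2: layered shifts, one whole-string pass per element of shift_list
  let result : List Char := shift_list.foldl
    (fun r s => r.map (fun c => if 32 ≤ c.toNat ∧ c.toNat ≤ 126 then pvShift s c else c)) temp
  let total_shift : Int := shift_list.sum
  let result := result.map (fun c => if 32 ≤ c.toNat ∧ c.toNat ≤ 126 then pvShift total_shift c else c)
  String.mk result

-- ===== PORT B =====
def caesar_encrypt_variable_alt (text : String) (shift_list : List Int) : String :=
  let n : Int := shift_list.length
  let total2 : Int := 2 * shift_list.sum
  let combined : List Int := shift_list.map (fun s => PySem.Int.mod (s + total2) 95)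
  let out : List Char := (PySem.List.enumerate text.toList 0).foldl
    (fun acc p =>
      if 32 ≤ p.2.toNat ∧ p.2.toNat ≤ 126 then
        acc ++ [Char.ofNat ((PySem.Int.mod ((p.2.toNat : Int) - 32
                  + PySem.List.pyGetD combined (PySem.Int.mod p.1 n) 0) 95 + 32).toNat)]
      else acc ++ [p.2]) []
  String.mk out

-- ===== PRECONDITION & SPEC =====
-- Pre_ excludes exactly the inputs where A raises ZeroDivisionError: an empty
-- shift_list together with a text containing at least one printable character.
def Pre_caesar_encrypt_variable (text : String) (shift_list : List Int) : Prop :=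
  shift_list = [] → ∀ c ∈ text.toList, ¬ (32 ≤ c.toNat ∧ c.toNat ≤ 126)
instance (text : String) (shift_list : List Int) : Decidable (Pre_caesar_encrypt_variable text shift_list) := by unfold Pre_caesar_encrypt_variable; infer_instance
def pvWitness_caesar_encrypt_variable : String × List Int := ("Hello, World!", [3, -7, 40])

def Spec_caesar_encrypt_variable (text : String) (shift_list : List Int) (out : String) : Prop := out = caesar_encrypt_variable_alt text shift_list
instance (text : String) (shift_list : List Int) (out : String) : Decidable (Spec_caesar_encrypt_variable text shift_list out) := by unfold Spec_caesar_encrypt_variable; infer_instance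

-- ===== CLAIM (what is proved, stated in full; the proofs are below) =====
def Claim_equal_caesar_encrypt_variable : Prop := ∀ (text : String) (shift_list : List Int), Dom_caesar_encrypt_variable text shift_list → Pre_caesar_encrypt_variable text shift_list → Spec_caesar_encrypt_variable text shift_list (caesar_encrypt_variable text shift_list)

-- ===== LEMMAS AND PROOFS =====

-- the conditional shift both programs apply to one character
def stepChar (s : Int) (c : Char) : Char :=
  if 32 ≤ c.toNat ∧ c.toNat ≤ 126 then pvShift s c else c

theorem toNat_ofNat_lt (n : Nat) (h : n < 127) : (Char.ofNat n).toNat = n := by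
  have : n.isValidChar := by left; omega
  rw [Char.toNat_ofNat]; simp [this]

theorem emod_absorb (x b : Int) : (x % 95 + b) % 95 = (x + b) % 95 := by
  conv_rhs => rw [Int.add_emod]
  rw [Int.add_emod (x % 95), Int.emod_emod_of_dvd x (dvd_refl 95)]

theorem toNat_pvShift (s : Int) (c : Char) (_h : 32 ≤ c.toNat ∧ c.toNat ≤ 126) :
    (pvShift s c).toNat = ((((c.toNat : Int) - 32 + s) % 95) + 32).toNat := by
  unfold pvShift
  rw [PySem.Int.mod_eq_emod_of_pos (by omega : (0:Int) < 95)]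
  apply toNat_ofNat_lt
  have := Int.emod_nonneg ((c.toNat : Int) - 32 + s) (by omega : (95:Int) ≠ 0)
  have := Int.emod_lt_of_pos ((c.toNat : Int) - 32 + s) (by omega : (0:Int) < 95)
  omega

theorem printable_pvShift (s : Int) (c : Char) (h : 32 ≤ c.toNat ∧ c.toNat ≤ 126) :
    32 ≤ (pvShift s c).toNat ∧ (pvShift s c).toNat ≤ 126 := by
  rw [toNat_pvShift s c h]
  have := Int.emod_nonneg ((c.toNat : Int) - 32 + s) (by omega : (95:Int) ≠ 0)
  have := Int.emod_lt_of_pos ((c.toNat : Int) - 32 + s) (by omega : (0:Int) < 95)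
  omega

theorem char_eq_of_toNat_eq (a b : Char) (h : a.toNat = b.toNat) : a = b := by
  rw [← Char.ofNat_toNat a, ← Char.ofNat_toNat b, h]

theorem stepChar_comp (a b : Int) (c : Char) :
    stepChar b (stepChar a c) = stepChar (a + b) c := by
  unfold stepChar
  by_cases h : 32 ≤ c.toNat ∧ c.toNat ≤ 126
  · rw [if_pos h, if_pos h, if_pos (printable_pvShift a c h)]
    apply char_eq_of_toNat_eq
    rw [toNat_pvShift b _ (printable_pvShift a c h), toNat_pvShift a c h,
        toNat_pvShift (a + b) c h]
    congr 1
    have hnn := Int.emod_nonneg ((c.toNat : Int) - 32 + a) (by omega : (95:Int) ≠ 0)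
    have h1 : (((((((c.toNat : Int) - 32 + a) % 95) + 32).toNat : Int)) - 32 + b)
         = ((((c.toNat : Int) - 32 + a) % 95) + b) := by omega
    rw [h1, emod_absorb]
    congr 2
    omega
  · rw [if_neg h, if_neg h, if_neg h]

theorem stepChar_zero (c : Char) : stepChar 0 c = c := by
  unfold stepChar
  by_cases h : 32 ≤ c.toNat ∧ c.toNat ≤ 126
  · rw [if_pos h]
    have ht : (pvShift 0 c).toNat = c.toNat := by
      rw [toNat_pvShift 0 c h]
      have : ((c.toNat : Int) - 32 + 0) % 95 = (c.toNat : Int) - 32 := by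
        rw [Int.emod_eq_of_lt (by omega) (by omega)]; omega
      omega
    calc pvShift 0 c = Char.ofNat (pvShift 0 c).toNat := (Char.ofNat_toNat _).symm
      _ = Char.ofNat c.toNat := by rw [ht]
      _ = c := Char.ofNat_toNat c
  · rw [if_neg h]

theorem stepChar_emod (a : Int) (c : Char) : stepChar (a % 95) c = stepChar a c := by
  unfold stepChar
  by_cases h : 32 ≤ c.toNat ∧ c.toNat ≤ 126
  · rw [if_pos h, if_pos h]
    unfold pvShift
    rw [PySem.Int.mod_eq_emod_of_pos (by omega : (0:Int) < 95),
        PySem.Int.mod_eq_emod_of_pos (by omega : (0:Int) < 95)]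
    congr 2
    rw [add_comm ((c.toNat : Int) - 32) (a % 95), add_comm ((c.toNat : Int) - 32) a]
    exact congrArg (· + 32) (emod_absorb a ((c.toNat : Int) - 32))
  · rw [if_neg h, if_neg h]

theorem map_stepChar_zero (t : List Char) : t.map (stepChar 0) = t := by
  induction t with
  | nil => rfl
  | cons c t ih => simp [stepChar_zero, ih]

-- the layered fold in step 2 is one map by the sum of the shifts
theorem layered_fold (l : List Int) (t : List Char) :
    l.foldl (fun r s => r.map (fun c => if 32 ≤ c.toNat ∧ c.toNat ≤ 126 then pvShift s c else c)) t
      = t.map (stepChar l.sum) := by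
  induction l generalizing t with
  | nil => simp only [List.foldl_nil, List.sum_nil]; exact (map_stepChar_zero t).symm
  | cons s rest ih =>
    simp only [List.foldl_cons, ih, List.map_map, List.sum_cons]
    apply List.map_congr_left
    intro c _
    show stepChar rest.sum (stepChar s c) = stepChar (s + rest.sum) c
    exact stepChar_comp s rest.sum c

theorem stepChar_nonprintable (s : Int) (c : Char) (h : ¬ (32 ≤ c.toNat ∧ c.toNat ≤ 126)) :
    stepChar s c = c := by
  unfold stepChar; rw [if_neg h]

theorem fold_append_map (ps : List (Int × Char)) (g : Int × Char → Char) (acc : List Char) :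
    ps.foldl (fun acc p => acc ++ [g p]) acc = acc ++ ps.map g := by
  induction ps generalizing acc with
  | nil => simp
  | cons p rest ih => simp [ih]

-- the step-1 fold bodies of both ports, as maps
theorem fold_if_eq (ps : List (Int × Char)) (f : Int → Int) (acc : List Char) :
    ps.foldl (fun acc p =>
      if 32 ≤ p.2.toNat ∧ p.2.toNat ≤ 126 then acc ++ [pvShift (f p.1) p.2] else acc ++ [p.2]) acc
      = acc ++ ps.map (fun p => stepChar (f p.1) p.2) := by
  have he : (fun (acc : List Char) (p : Int × Char) =>
      if 32 ≤ p.2.toNat ∧ p.2.toNat ≤ 126 then acc ++ [pvShift (f p.1) p.2] else acc ++ [p.2])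
      = fun acc p => acc ++ [stepChar (f p.1) p.2] := by
    funext acc p
    unfold stepChar
    by_cases h : 32 ≤ p.2.toNat ∧ p.2.toNat ≤ 126 <;> simp [h]
  rw [he, fold_append_map]

theorem caesar_encrypt_variable_spec : Claim_equal_caesar_encrypt_variable := by
  intro text shift_list _hdom hpre
  unfold Spec_caesar_encrypt_variable caesar_encrypt_variable caesar_encrypt_variable_alt
  dsimp only
  rw [fold_if_eq (PySem.List.enumerate text.toList 0)
        (fun i => PySem.List.pyGetD shift_list (PySem.Int.mod i (shift_list.length : Int)) 0) []]
  have hb : (PySem.List.enumerate text.toList 0).foldl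
      (fun acc p =>
        if 32 ≤ p.2.toNat ∧ p.2.toNat ≤ 126 then
          acc ++ [Char.ofNat ((PySem.Int.mod ((p.2.toNat : Int) - 32
            + PySem.List.pyGetD (shift_list.map (fun s => PySem.Int.mod (s + 2 * shift_list.sum) 95))
                (PySem.Int.mod p.1 (shift_list.length : Int)) 0) 95 + 32).toNat)]
        else acc ++ [p.2]) []
      = [] ++ (PySem.List.enumerate text.toList 0).map (fun p => stepChar
          (PySem.List.pyGetD (shift_list.map (fun s => PySem.Int.mod (s + 2 * shift_list.sum) 95))
            (PySem.Int.mod p.1 (shift_list.length : Int)) 0) p.2) :=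
    fold_if_eq (PySem.List.enumerate text.toList 0)
      (fun i => PySem.List.pyGetD (shift_list.map (fun s => PySem.Int.mod (s + 2 * shift_list.sum) 95))
        (PySem.Int.mod i (shift_list.length : Int)) 0) []
  rw [hb, List.nil_append, List.nil_append, layered_fold]
  simp only [List.map_map]
  rw [show (fun c : Char => if 32 ≤ c.toNat ∧ c.toNat ≤ 126 then pvShift shift_list.sum c else c)
        = stepChar shift_list.sum from rfl]
  congr 1
  apply List.map_congr_left
  intro p hp
  obtain ⟨k, hk, rfl⟩ := (PySem.List.mem_enumerate_iff _ _ _).mp hp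
  simp only [Function.comp]
  by_cases hpr : 32 ≤ (text.toList[k]).toNat ∧ (text.toList[k]).toNat ≤ 126
  case neg =>
    rw [stepChar_nonprintable _ _ hpr, stepChar_nonprintable _ _ hpr,
        stepChar_nonprintable _ _ hpr, stepChar_nonprintable _ _ hpr]
  case pos =>
    rcases List.eq_nil_or_concat' shift_list with rfl | _
    · exact absurd hpr (hpre rfl _ (List.getElem_mem hk))
    have hn : 0 < shift_list.length := by
      cases shift_list with
      | nil => simp_all
      | cons a l => simp
    have hnI : (0:Int) < (shift_list.length : Int) := by exact_mod_cast hn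
    rw [PySem.Int.mod_eq_emod_of_pos hnI]
    set i : Int := ((0:Int) + (k:Int)) % (shift_list.length : Int) with hidef
    have hi0 : 0 ≤ i := Int.emod_nonneg _ (by omega)
    have hilt : i < (shift_list.length : Int) := Int.emod_lt_of_pos _ hnI
    rw [stepChar_comp, stepChar_comp]
    rw [PySem.List.pyGetD_eq_getElem _ _ hi0 hilt,
        PySem.List.pyGetD_eq_getElem _ _ hi0 (by simpa using hilt)]
    rw [List.getElem_map]
    rw [PySem.Int.mod_eq_emod_of_pos (by omega : (0:Int) < 95)]
    rw [stepChar_emod]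
    congr 1
    ring
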